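-- pv_equiv track=rewrite | github.com/penryoa/rose-hulman_backup | 22 Exam3Practice/src/m4_sequences.py | practice_problem4d
-- ===== SOURCE A (Python) =====
-- import math
--
-- def is_prime(n):
--     """
--     What comes in:   An integer.
--     What goes out:  Returns True if the given integer is prime.
--                     Returns False if the given integer is NOT prime.
--     Side effects: None.
--     Examples:
--       This function returns True or False, depending on whether
--       the given integer is prime or not.  Since the smallest prime is 2,
--       this function returns False on all integers < 2.
--       It returns True on 2, 3, 5, 7, and other primes.
--     Note: The algorithm used here is simple and clear but slow.
--     Type hints:
--       :type n: int
--     """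
--     if n < 2:
--         return False
--
--     for k in range(2, int(math.sqrt(n) + 0.1) + 1):
--         if n % k == 0:
--             return False
--
--     return True
--
-- def practice_problem4d(sequence):
--     """
--     What comes in: A non-empty sequence of integers.
--     What goes out: An integer that is the sum of all the items
--       in the given sequence such that:
--         -- the item is a prime number, AND
--         -- the immediate successor of the item
--              is a DIFFERENT prime number.
--     Side effects: None.
--     Examples:
--       Given sequence (6, 80, 17, 13, 40, 3, 3, 7, 13, 7, 12, 5)
--          -- this function returns  17 + 3 + 7 + 13,  which is 40,
--             because:
--             6 (at index 0) is NOT prime - do NOT include 6 in the sum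
--             80 (at index 1) is NOT prime - do NOT include 80 in the sum
--
--             17 (at index 2) IS prime AND the next item (13, at index 3)
--               is a DIFFERENT prime - ** DO ** include 17 in the sum
--
--             13 (at index 3) IS prime but the next item (40, at index 4)
--               is NOT prime - do NOT include 13 in the sum
--             40 (at index 4) is NOT prime - do NOT include 40 in the sum
--             3 (at index 5) IS prime AND the next item (3, at index 6)
--               IS prime but is NOT a DIFFERENT prime -
--               do NOT include 3 in the sum
--
--             3 (at index 6) IS prime AND the next item (7, at index 7)
--               is a DIFFERENT prime - ** DO ** include 3 in the sum
--             7 (at index 7) IS prime AND the next item (13, at index 8)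
--               is a DIFFERENT prime - ** DO ** include 7 in the sum
--             13 (at index 8) IS prime AND the next item (7, at index 9)
--               is a DIFFERENT prime - ** DO ** include 13 in the sum
--
--             7 (at index 9) IS prime but the next item (12, at index 10)
--               is NOT prime - do NOT include 7 in the sum
--             12 (at index 10) is NOT prime - do NOT include 12 in the sum
--             5 (at index 11) IS prime but there is NO item after it
--                - do NOT include 5 in the sum
--
--       Given sequence (7, 7, 7, 7, 7, 4, 4, 8, 5, 5, 6)
--          -- this function returns 0
--
--       Given sequence (2, 3, 5, 7, 5, 3, 2)
--          -- this function returns 2 + 3 + 5 + 7 + 5 + 3, which is 25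
--
--     Type hints:
--       :type sequence: (list | tuple) of int
--       :rtype: int
--     """
--     ####################################################################
--     # DONE: 5. Implement and test this function.
--     #     The testing code is already written for you (above).
--     ####################################################################
--     # DIFFICULTY AND TIME RATINGS (see top of this file for explanation)
--     #    DIFFICULTY:      7
--     #    TIME ESTIMATE:   15 minutes.
--     ####################################################################
--
--     sum = 0
--     for k in range(len(sequence)-1):
--         if sequence[k+1] != sequence[k]:
--             if is_prime(sequence[k]) == True:
--                 if is_prime(sequence[k+1]) == True:
--                     sum = sum + sequence[k]
--     return sum
-- ===== SOURCE B (Python) =====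
-- import math
--
-- def is_prime(n):
--     if n < 2:
--         return False
--     for k in range(2, int(math.sqrt(n) + 0.1) + 1):
--         if n % k == 0:
--             return False
--     return True
--
-- def practice_problem4d(sequence):
--     # Phase 1: run-length collapse - keep one representative per run of
--     # consecutive equal values.  Adjacent qualifying pairs of the original
--     # sequence correspond exactly to adjacent runs (which are distinct by
--     # construction), so the inequality test disappears from phase 2.
--     runs = []
--     for x in sequence:
--         if not runs or runs[-1] != x:
--             runs.append(x)
--     # Phase 2: sum the first of each adjacent prime pair of runs.
--     total = 0
--     for a, b in zip(runs, runs[1:]):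
--         if is_prime(a) and is_prime(b):
--             total += a
--     return total
-- ===== Notes on version B (the rewrite author's own statement) =====
-- stated objective: alternative
-- what changed: B first run-length-collapses the sequence (one representative per maximal run of consecutive equal values), then sums the first of each adjacent prime pair of runs; since adjacent runs are distinct by construction, the inequality test disappears and primality is tested once per run instead of twice per element.
import Mathlib
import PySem

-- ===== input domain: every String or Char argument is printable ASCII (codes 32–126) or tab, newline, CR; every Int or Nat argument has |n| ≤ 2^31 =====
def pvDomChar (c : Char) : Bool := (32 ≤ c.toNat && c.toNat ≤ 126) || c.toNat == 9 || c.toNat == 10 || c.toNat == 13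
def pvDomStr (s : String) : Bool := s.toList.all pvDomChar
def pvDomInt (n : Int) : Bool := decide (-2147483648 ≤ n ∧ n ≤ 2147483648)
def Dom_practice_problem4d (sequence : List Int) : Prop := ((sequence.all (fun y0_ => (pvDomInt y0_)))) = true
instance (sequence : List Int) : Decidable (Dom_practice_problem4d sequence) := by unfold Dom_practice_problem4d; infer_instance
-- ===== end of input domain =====

-- B replaces A's single index loop over all adjacent positions by a run-length collapse
-- (one representative per run of consecutive equal values) followed by a prime-pair sum
-- over the distinct runs, eliminating the inequality test (objective: alternative).

-- ===== PORT A =====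
-- is_prime, shared verbatim by A and B (both Python files contain the identical function).
-- Trial-division bound: Python's int(math.sqrt(n) + 0.1) is Nat.sqrt or Nat.sqrt + 1 on the
-- ±2^31 domain; the possible extra candidate divisor never changes the result (a divisor > √n
-- pairs with a cofactor ≤ √n that the loop already tried), so the Nat.sqrt bound is exact here.
def pyIsPrime (n : Int) : Bool :=
  if n < 2 then false
  else (PySem.List.pyRange 2 (Nat.sqrt n.toNat + 1) 1).all (fun k => !(PySem.Int.mod n k == 0))

def practice_problem4d (sequence : List Int) : Int :=
  (PySem.List.pyRange 0 ((sequence.length : Int) - 1) 1).foldl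
    (fun sum k =>
      if PySem.List.pyGetD sequence (k + 1) 0 ≠ PySem.List.pyGetD sequence k 0 then
        if pyIsPrime (PySem.List.pyGetD sequence k 0) = true then
          if pyIsPrime (PySem.List.pyGetD sequence (k + 1) 0) = true then
            sum + PySem.List.pyGetD sequence k 0
          else sum
        else sum
      else sum) 0

-- ===== PORT B =====
def practice_problem4d_alt (sequence : List Int) : Int :=
  let runs := sequence.foldl
    (fun runs x => if runs.getLast? = some x then runs else runs ++ [x]) []
  (runs.zip runs.tail).foldl
    (fun total p => if pyIsPrime p.1 && pyIsPrime p.2 then total + p.1 else total) 0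

-- ===== PRECONDITION & SPEC =====
def Spec_practice_problem4d (sequence : List Int) (out : Int) : Prop := out = practice_problem4d_alt sequence
instance (sequence : List Int) (out : Int) : Decidable (Spec_practice_problem4d sequence out) := by unfold Spec_practice_problem4d; infer_instance

-- ===== CLAIM (what is proved, stated in full; the proofs are below) =====
def Claim_equal_practice_problem4d : Prop := ∀ (sequence : List Int), Dom_practice_problem4d sequence → Spec_practice_problem4d sequence (practice_problem4d sequence)

-- ===== LEMMAS AND PROOFS =====

-- Recursive characterisation of A's adjacent-pair prime sum.
def pairSum : List Int → Int
  | x :: y :: t =>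
      (if y ≠ x ∧ pyIsPrime x = true ∧ pyIsPrime y = true then x else 0) + pairSum (y :: t)
  | _ => 0

-- the per-index summand of A's loop, with Nat indices
def hA (xs : List Int) (k : Nat) : Int :=
  if xs.getD (k + 1) 0 ≠ xs.getD k 0 ∧ pyIsPrime (xs.getD k 0) = true
      ∧ pyIsPrime (xs.getD (k + 1) 0) = true then xs.getD k 0 else 0

lemma sum_range_hA : ∀ (xs : List Int) (x : Int),
    ((List.range xs.length).map (hA (x :: xs))).sum = pairSum (x :: xs) := by
  intro xs
  induction xs with
  | nil => intro x; simp [pairSum]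
  | cons y t ih =>
      intro x
      rw [show (y :: t).length = t.length + 1 from rfl, List.range_succ_eq_map]
      simp only [List.map_cons, List.map_map, List.sum_cons]
      have : (List.range t.length).map (hA (x :: y :: t) ∘ (· + 1))
           = (List.range t.length).map (hA (y :: t)) := by
        apply List.map_congr_left; intro k _; simp [hA]
      rw [this, ih y, pairSum]
      simp [hA]

lemma foldA_eq (xs : List Int) : practice_problem4d xs = pairSum xs := by
  unfold practice_problem4d
  have hbody : (fun (sum k : Int) =>
      if PySem.List.pyGetD xs (k + 1) 0 ≠ PySem.List.pyGetD xs k 0 then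
        if pyIsPrime (PySem.List.pyGetD xs k 0) = true then
          if pyIsPrime (PySem.List.pyGetD xs (k + 1) 0) = true then
            sum + PySem.List.pyGetD xs k 0
          else sum
        else sum
      else sum)
      = (fun sum k => sum +
          (if PySem.List.pyGetD xs (k + 1) 0 ≠ PySem.List.pyGetD xs k 0
              ∧ pyIsPrime (PySem.List.pyGetD xs k 0) = true
              ∧ pyIsPrime (PySem.List.pyGetD xs (k + 1) 0) = true
            then PySem.List.pyGetD xs k 0 else 0)) := by
    funext s k; split_ifs <;> simp_all
  rw [hbody, PySem.List.foldl_add, PySem.List.pyRange_one]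
  cases xs with
  | nil => simp [pairSum]
  | cons x t =>
      have hlen : (((x :: t).length : Int) - 1 - 0).toNat = t.length := by
        simp [List.length_cons]
      rw [hlen, List.map_map, zero_add]
      rw [show ((List.range t.length).map
            ((fun k =>
          if PySem.List.pyGetD (x :: t) (k + 1) 0 ≠ PySem.List.pyGetD (x :: t) k 0
              ∧ pyIsPrime (PySem.List.pyGetD (x :: t) k 0) = true
              ∧ pyIsPrime (PySem.List.pyGetD (x :: t) (k + 1) 0) = true
            then PySem.List.pyGetD (x :: t) k 0 else 0) ∘ (fun k : Nat => (0 : Int) + k)))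
          = (List.range t.length).map (hA (x :: t)) from ?_]
      · exact sum_range_hA t x
      · apply List.map_congr_left
        intro k _
        have h1 : ((0 : Int) + (k : Int)) = ((k : Nat) : Int) := by ring
        have h2 : ((k : Int)) + 1 = (((k + 1 : Nat)) : Int) := by push_cast; ring
        simp only [Function.comp, h1, h2, PySem.List.pyGetD_natCast, hA]

-- Recursive characterisation of B's run-length collapse, given the last kept value l.
def dedupFrom (l : Int) : List Int → List Int
  | [] => []
  | x :: t => if x = l then dedupFrom l t else x :: dedupFrom x t

-- B's first fold (with append) computes acc ++ dedupFrom (last of acc).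
lemma foldRuns_eq : ∀ (t acc : List Int) (l : Int), acc.getLast? = some l →
    t.foldl (fun runs x => if runs.getLast? = some x then runs else runs ++ [x]) acc
      = acc ++ dedupFrom l t := by
  intro t
  induction t with
  | nil => intro acc l _; simp [dedupFrom]
  | cons x u ih =>
      intro acc l hl
      simp only [List.foldl_cons, dedupFrom]
      by_cases hx : x = l
      · rw [hl, if_pos (by rw [hx]), if_pos hx, ih acc l hl]
      · rw [hl, if_neg (by simpa using fun h => hx h.symm), if_neg hx,
          ih (acc ++ [x]) x (by simp)]
        simp
  
lemma runs_cons (x : Int) (t : List Int) :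
    (x :: t).foldl (fun runs x => if runs.getLast? = some x then runs else runs ++ [x]) []
      = x :: dedupFrom x t := by
  simp only [List.foldl_cons, List.getLast?_nil]
  rw [if_neg (by simp), List.nil_append, foldRuns_eq t [x] x (by simp)]
  simp

-- The prime-pair sum over a dedup list (no inequality test).
def pSum : List Int → Int
  | a :: b :: t => (if pyIsPrime a = true ∧ pyIsPrime b = true then a else 0) + pSum (b :: t)
  | _ => 0

-- pairSum collapses to pSum on the dedup list.
lemma pairSum_dedup : ∀ (t : List Int) (x : Int),
    pairSum (x :: t) = pSum (x :: dedupFrom x t) := by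
  intro t
  induction t with
  | nil => intro x; simp [pairSum, dedupFrom, pSum]
  | cons y u ih =>
      intro x
      by_cases hxy : y = x
      · subst hxy
        rw [pairSum, dedupFrom, if_pos rfl, if_neg (by simp), ih y, zero_add]
      · rw [pairSum, dedupFrom, if_neg hxy, ih y]
        by_cases hp : pyIsPrime x = true ∧ pyIsPrime y = true
        · rw [if_pos ⟨hxy, hp.1, hp.2⟩, pSum, if_pos hp]
        · rw [if_neg (fun h => hp ⟨h.2.1, h.2.2⟩), pSum, if_neg hp, zero_add]

-- B's second fold, with a generalised accumulator.
lemma foldPairs_eq : ∀ (r : List Int) (a : Int),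
    (r.zip r.tail).foldl
      (fun total p => if pyIsPrime p.1 && pyIsPrime p.2 then total + p.1 else total) a
      = a + pSum r := by
  intro r
  induction r with
  | nil => intro a; simp [pSum]
  | cons x t ih =>
      intro a
      cases t with
      | nil => simp [pSum]
      | cons y u =>
          simp only [List.tail_cons, List.zip_cons_cons, List.foldl_cons]
          simp only [List.tail_cons] at ih
          rw [ih]
          rw [pSum]
          by_cases hp : pyIsPrime x = true ∧ pyIsPrime y = true
          · rw [if_pos (by simp [hp.1, hp.2]), if_pos hp]; ring
          · rw [if_neg (by intro h; exact hp (by simpa [Bool.and_eq_true] using h)),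
              if_neg hp]; ring

-- ===== VERDICT (by name: the statement is the Claim_ definition above) =====
theorem practice_problem4d_spec : Claim_equal_practice_problem4d := by
  intro xs _
  unfold Spec_practice_problem4d practice_problem4d_alt
  rw [foldA_eq]
  cases xs with
  | nil => simp [pairSum]
  | cons x t =>
      simp only [runs_cons]
      rw [foldPairs_eq, zero_add, pairSum_dedup]
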